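-- pv_equiv track=rewrite | github.com/seiji-shimizu/RecordTwin | Submission/NEextraction/negation_detection.py | return_marked_sentences
-- ===== SOURCE A (Python) =====
-- def return_marked_sentences(all_word_label_pairs):
--     words_list = []
--     labeld_list = []
--
--     for id, dict in all_word_label_pairs.items():
--         for word_id, (word, label) in dict.items():
--             words_list.append(word)
--             labeld_list.append(label)
--
--     marked = []
--     entity_type_list = []
--
--     all_aligned = []
--
--     for i, (word, label) in enumerate(zip(words_list, labeld_list)):
--         all_aligned.append((word, label))
--
--     entity_id = 0
--     pointer = 0
--     while pointer < len(all_aligned):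
--         if all_aligned[pointer][1] == 'O' and all_aligned[pointer][0] != '\n':
--             marked.append(all_aligned[pointer][0])
--             pointer += 1
--         elif all_aligned[pointer][1][0] == 'B':
--             entity_type = all_aligned[pointer][1][2:]
--             entity_type_list.append(entity_type)
--             marked.append(f'<e{entity_id}>')
--             marked.append(all_aligned[pointer][0])
--             pointer += 1
--             while pointer < len(all_aligned) and all_aligned[pointer][1][0] == 'I':
--                 marked.append(all_aligned[pointer][0])
--                 pointer += 1
--             marked.append(f'</e{entity_id}>')
--             entity_id += 1
--         elif all_aligned[pointer][0] == '\n':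
--             entity_type_list.append('<br>')
--             pointer += 1
--         else:
--             marked.append(all_aligned[pointer][0])
--             pointer += 1
--     return marked, entity_type_list
-- ===== SOURCE B (Python) =====
-- def return_marked_sentences(all_word_label_pairs):
--     pairs = [wl for d in all_word_label_pairs.values() for wl in d.values()]
--     marked = []
--     entity_type_list = []
--     entity_id = 0
--     in_entity = False
--     for word, label in pairs:
--         if in_entity:
--             if label[0] == 'I':
--                 marked.append(word)
--                 continue
--             marked.append(f'</e{entity_id}>')
--             entity_id += 1
--             in_entity = False
--         if label == 'O' and word != '\n':
--             marked.append(word)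
--         elif label[0] == 'B':
--             entity_type_list.append(label[2:])
--             marked.append(f'<e{entity_id}>')
--             marked.append(word)
--             in_entity = True
--         elif word == '\n':
--             entity_type_list.append('<br>')
--         else:
--             marked.append(word)
--     if in_entity:
--         marked.append(f'</e{entity_id}>')
--     return marked, entity_type_list
-- ===== Notes on version B (the rewrite author's own statement) =====
-- stated objective: simpler
-- what changed: Replaced A's pointer index with an outer while and a nested inner while that consumes I-tokens by a single flat for-loop over the flattened (word,label) pairs carrying an in_entity flag and the current entity id, closing the entity tag and falling through when the flag drops.
import Mathlib
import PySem

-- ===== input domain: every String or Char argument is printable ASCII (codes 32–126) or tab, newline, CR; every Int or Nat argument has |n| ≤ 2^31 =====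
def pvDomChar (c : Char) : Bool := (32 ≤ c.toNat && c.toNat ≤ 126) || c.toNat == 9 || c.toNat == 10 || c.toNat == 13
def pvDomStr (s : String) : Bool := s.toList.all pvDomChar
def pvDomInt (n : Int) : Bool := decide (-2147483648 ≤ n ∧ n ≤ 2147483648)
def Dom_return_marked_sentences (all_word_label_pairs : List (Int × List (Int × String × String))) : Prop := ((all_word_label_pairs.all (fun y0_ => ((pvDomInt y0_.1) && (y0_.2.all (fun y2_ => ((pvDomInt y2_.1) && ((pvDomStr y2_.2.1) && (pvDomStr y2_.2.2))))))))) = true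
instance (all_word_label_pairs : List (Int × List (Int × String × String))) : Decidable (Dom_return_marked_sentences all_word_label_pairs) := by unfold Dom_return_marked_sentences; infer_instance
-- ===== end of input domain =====

-- B replaces A's pointer-plus-nested-while scan with a single fold carrying an
-- in_entity flag (objective: simpler, same O(total tokens) pass).

-- helpers shared by both ports: the f-strings f'<e{id}>' / f'</e{id}>'
def openTag (eid : Int) : String := "<e" ++ PySem.Int.toStr eid ++ ">"
def closeTag (eid : Int) : String := "</e" ++ PySem.Int.toStr eid ++ ">"

-- ===== PORT A =====
-- inner 'while pointer < len and label[0] == "I"' loop: returns (marked, remaining tokens)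
def innerWhileA : List (String × String) → List String → List String × List (String × String)
  | [], marked => (marked, [])
  | (w, lab) :: rest, marked =>
    if PySem.Str.pyGet? lab 0 = some 'I' then innerWhileA rest (marked ++ [w])
    else (marked, (w, lab) :: rest)

theorem innerWhileA_len : ∀ (l : List (String × String)) (m : List String),
    (innerWhileA l m).2.length ≤ l.length := by
  intro l
  induction l with
  | nil => intro m; simp [innerWhileA]
  | cons p rest ih =>
    intro m
    obtain ⟨w, lab⟩ := p
    simp only [innerWhileA]
    split
    · exact le_trans (ih _) (by simp)
    · simp

-- outer 'while pointer < len(all_aligned)' loop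
def outerA : List (String × String) → Int → List String → List String → List String × List String
  | [], _, marked, types => (marked, types)
  | (w, lab) :: rest, eid, marked, types =>
    if lab = "O" ∧ w ≠ "\n" then outerA rest eid (marked ++ [w]) types
    else if PySem.Str.pyGet? lab 0 = some 'B' then
      let r := innerWhileA rest (marked ++ [openTag eid, w])
      outerA r.2 (eid + 1) (r.1 ++ [closeTag eid]) (types ++ [PySem.Str.slice lab (some 2) none])
    else if w = "\n" then outerA rest eid marked (types ++ ["<br>"])
    else outerA rest eid (marked ++ [w]) types
termination_by l => l.length
decreasing_by
  · simp
  · exact Nat.lt_succ_of_le (innerWhileA_len rest _)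
  · simp
  · simp

def return_marked_sentences (all_word_label_pairs : List (Int × List (Int × String × String))) : List String × List String :=
  let words_list := all_word_label_pairs.foldl (fun acc p => p.2.foldl (fun a q => a ++ [q.2.1]) acc) []
  let labeld_list := all_word_label_pairs.foldl (fun acc p => p.2.foldl (fun a q => a ++ [q.2.2]) acc) []
  let all_aligned := (List.zip words_list labeld_list).foldl (fun acc p => acc ++ [p]) []
  outerA all_aligned 0 [] []

-- ===== PORT B =====
-- processing of a token outside an entity
def procB (m t : List String) (eid : Int) (w lab : String) : List String × List String × Int × Bool :=
  if lab = "O" ∧ w ≠ "\n" then (m ++ [w], t, eid, false)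
  else if PySem.Str.pyGet? lab 0 = some 'B' then
    (m ++ [openTag eid, w], t ++ [PySem.Str.slice lab (some 2) none], eid, true)
  else if w = "\n" then (m, t ++ ["<br>"], eid, false)
  else (m ++ [w], t, eid, false)

-- one step of B's fold; state = (marked, entity_type_list, entity_id, in_entity)
def stepB (st : List String × List String × Int × Bool) (p : String × String) : List String × List String × Int × Bool :=
  match st, p with
  | (m, t, eid, ine), (w, lab) =>
    if ine then
      if PySem.Str.pyGet? lab 0 = some 'I' then (m ++ [w], t, eid, true)
      else procB (m ++ [closeTag eid]) t (eid + 1) w lab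
    else procB m t eid w lab

-- the trailing 'if in_entity: append closing tag'
def finalizeB (st : List String × List String × Int × Bool) : List String × List String :=
  match st with
  | (m, t, eid, ine) => (if ine then m ++ [closeTag eid] else m, t)

def return_marked_sentences_alt (all_word_label_pairs : List (Int × List (Int × String × String))) : List String × List String :=
  let pairs := all_word_label_pairs.flatMap (fun p => p.2.map (fun q => q.2))
  finalizeB (pairs.foldl stepB ([], [], (0 : Int), false))

-- ===== PRECONDITION & SPEC =====
-- Pre_ excludes inputs containing an empty-string label: there Python A raises
-- IndexError on label[0] (and B raises the same way).
def Pre_return_marked_sentences (all_word_label_pairs : List (Int × List (Int × String × String))) : Prop :=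
  ∀ p ∈ all_word_label_pairs, ∀ q ∈ p.2, q.2.2 ≠ ""
instance (all_word_label_pairs : List (Int × List (Int × String × String))) : Decidable (Pre_return_marked_sentences all_word_label_pairs) := by unfold Pre_return_marked_sentences; infer_instance

def pvWitness_return_marked_sentences : (List (Int × List (Int × String × String))) :=
  [(0, [(0, ("hi", "O")), (1, ("ann", "B-PER")), (2, ("smith", "I-PER"))]), (1, [(0, ("\n", "O"))])]

def Spec_return_marked_sentences (all_word_label_pairs : List (Int × List (Int × String × String))) (out : List String × List String) : Prop := out = return_marked_sentences_alt all_word_label_pairs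
instance (all_word_label_pairs : List (Int × List (Int × String × String))) (out : List String × List String) : Decidable (Spec_return_marked_sentences all_word_label_pairs out) := by unfold Spec_return_marked_sentences; infer_instance

-- ===== CLAIM (what is proved, stated in full; the proofs are below) =====
def Claim_equal_return_marked_sentences : Prop := ∀ (all_word_label_pairs : List (Int × List (Int × String × String))), Dom_return_marked_sentences all_word_label_pairs → Pre_return_marked_sentences all_word_label_pairs → Spec_return_marked_sentences all_word_label_pairs (return_marked_sentences all_word_label_pairs)

-- ===== LEMMAS AND PROOFS =====

-- flattening: A's two word/label folds, zipped, give B's single flatMap of pairs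
theorem zip_flat_eq (l : List (Int × List (Int × String × String))) :
    List.zip (l.flatMap (fun p => p.2.map (fun q => q.2.1)))
             (l.flatMap (fun p => p.2.map (fun q => q.2.2)))
      = l.flatMap (fun p => p.2.map (fun q => q.2)) := by
  induction l with
  | nil => simp
  | cons p rest ih =>
    simp only [List.flatMap_cons]
    rw [List.zip_append (by simp), ih, List.zip_map']

-- core: B's flagged fold equals A's pointer machine, both flag states at once
theorem fold_eq_outer : ∀ (n : Nat) (pairs : List (String × String)), pairs.length ≤ n →
    (∀ m t eid, finalizeB (pairs.foldl stepB (m, t, eid, false)) = outerA pairs eid m t) ∧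
    (∀ m t eid, finalizeB (pairs.foldl stepB (m, t, eid, true)) =
        outerA (innerWhileA pairs m).2 (eid + 1) ((innerWhileA pairs m).1 ++ [closeTag eid]) t) := by
  intro n
  induction n with
  | zero =>
    intro pairs h
    have : pairs = [] := List.eq_nil_of_length_eq_zero (Nat.le_zero.mp h)
    subst this
    exact ⟨fun m t eid => by simp [finalizeB, outerA], fun m t eid => by simp [finalizeB, outerA, innerWhileA]⟩
  | succ n ih =>
    intro pairs h
    cases pairs with
    | nil =>
      exact ⟨fun m t eid => by simp [finalizeB, outerA], fun m t eid => by simp [finalizeB, outerA, innerWhileA]⟩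
    | cons p rest =>
      obtain ⟨w, lab⟩ := p
      have hr : rest.length ≤ n := by simpa using Nat.lt_succ_iff.mp (lt_of_lt_of_le (by simp) h)
      -- processing one boundary token then folding the rest = outerA on the cons
      have hproc : ∀ m t eid, finalizeB (rest.foldl stepB (procB m t eid w lab)) = outerA ((w, lab) :: rest) eid m t := by
        intro m t eid
        by_cases h1 : lab = "O" ∧ w ≠ "\n"
        · simp only [procB, outerA, if_pos h1]
          exact (ih rest hr).1 _ _ _
        · by_cases h2 : PySem.Str.pyGet? lab 0 = some 'B'
          · simp only [procB, outerA, if_neg h1, if_pos h2]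
            exact (ih rest hr).2 _ _ _
          · by_cases h3 : w = "\n"
            · simp only [procB, outerA, if_neg h1, if_neg h2, if_pos h3]
              exact (ih rest hr).1 _ _ _
            · simp only [procB, outerA, if_neg h1, if_neg h2, if_neg h3]
              exact (ih rest hr).1 _ _ _
      constructor
      · intro m t eid
        simp only [List.foldl_cons, stepB, if_neg (by simp : ¬ (false = true))]
        exact hproc m t eid
      · intro m t eid
        by_cases hI : PySem.Str.pyGet? lab 0 = some 'I'
        · simp only [List.foldl_cons, stepB, if_true, innerWhileA, if_pos hI]
          exact (ih rest hr).2 _ _ _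
        · simp only [List.foldl_cons, stepB, if_true, innerWhileA, if_neg hI]
          exact hproc (m ++ [closeTag eid]) t (eid + 1)

-- A's word/label accumulation folds as flatMaps
theorem wordsFold_eq (l : List (Int × List (Int × String × String))) (acc : List String) :
    l.foldl (fun acc p => p.2.foldl (fun a q => a ++ [q.2.1]) acc) acc
      = acc ++ l.flatMap (fun p => p.2.map (fun q => q.2.1)) := by
  simp only [PySem.List.foldl_append_singleton_eq_map]
  rw [PySem.List.foldl_append_eq_flatMap]

theorem labelsFold_eq (l : List (Int × List (Int × String × String))) (acc : List String) :
    l.foldl (fun acc p => p.2.foldl (fun a q => a ++ [q.2.2]) acc) acc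
      = acc ++ l.flatMap (fun p => p.2.map (fun q => q.2.2)) := by
  simp only [PySem.List.foldl_append_singleton_eq_map]
  rw [PySem.List.foldl_append_eq_flatMap]

-- ===== VERDICT (by name: the statement is the Claim_ definition above) =====
theorem return_marked_sentences_spec : Claim_equal_return_marked_sentences := by
  intro l _ _
  unfold Spec_return_marked_sentences
  simp only [return_marked_sentences, return_marked_sentences_alt, wordsFold_eq, labelsFold_eq,
    PySem.List.foldl_append_singleton_eq_self, List.nil_append, zip_flat_eq]
  exact ((fold_eq_outer _ _ le_rfl).1 [] [] 0).symm
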